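-- pv_equiv track=rewrite | github.com/florisvdf/utilin | src/utilin/utils.py | determine_residue_offset
-- ===== SOURCE A (Python) =====
-- from collections import defaultdict, Counter
--
-- def determine_residue_offset(structure_sequence: str, reference_sequence: str) -> int:
--     structure_residue_positions = {
--         index: aa for index, aa in enumerate(structure_sequence)
--     }
--     reference_residue_positions = {
--         index: aa for index, aa in enumerate(reference_sequence)
--     }
--     matching_pairs = []
--     for idx_a, char_a in structure_residue_positions.items():
--         for idx_b, char_b in reference_residue_positions.items():
--             if char_a == char_b:
--                 matching_pairs.append((idx_a, idx_b))
--     offsets = defaultdict(int)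
--     for idx_a, idx_b in matching_pairs:
--         offset = idx_b - idx_a
--         offsets[offset] += 1
--     if offsets:
--         most_frequent_offset = max(offsets, key=offsets.get)
--         return most_frequent_offset
--     else:
--         return 0
-- ===== SOURCE B (Python) =====
-- def determine_residue_offset(structure_sequence: str, reference_sequence: str) -> int:
--     positions_by_char = {}
--     for j, c in enumerate(reference_sequence):
--         positions_by_char.setdefault(c, []).append(j)
--     counts = {}
--     for i, c in enumerate(structure_sequence):
--         for j in positions_by_char.get(c, []):
--             offset = j - i
--             counts[offset] = counts.get(offset, 0) + 1
--     if not counts: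
--         return 0
--     return max(counts, key=counts.get)
-- ===== Notes on version B (the rewrite author's own statement) =====
-- stated objective: faster
-- what changed: B indexes the reference positions by character once and counts offsets directly in a dict while scanning the structure sequence, instead of A's full n*m nested scan that materialises a matching-pairs list and then a second counting pass; insertion order of offsets (hence the max tie-break) is preserved.
import Mathlib
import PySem

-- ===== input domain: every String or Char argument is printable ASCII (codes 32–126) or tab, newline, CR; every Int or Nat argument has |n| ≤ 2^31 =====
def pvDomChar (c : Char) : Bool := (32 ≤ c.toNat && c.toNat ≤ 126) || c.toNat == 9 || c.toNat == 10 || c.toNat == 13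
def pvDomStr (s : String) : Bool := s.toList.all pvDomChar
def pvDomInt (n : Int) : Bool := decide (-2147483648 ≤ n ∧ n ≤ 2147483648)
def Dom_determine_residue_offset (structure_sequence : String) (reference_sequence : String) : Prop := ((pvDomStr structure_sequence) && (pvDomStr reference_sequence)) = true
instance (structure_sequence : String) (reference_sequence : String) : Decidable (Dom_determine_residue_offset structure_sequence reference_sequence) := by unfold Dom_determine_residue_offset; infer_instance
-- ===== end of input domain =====

-- B replaces A's full nested scan (pairs list + second counting pass) by a per-character
-- position index of the reference and a direct offset-count dict; same result, fewer passes.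

-- ===== PORT A =====
-- 'max(offsets, key=offsets.get)' is reached only under the nonempty guard, so the Option
-- returned by PySem.List.max? is some there; '.getD 0' extracts it (the default is dead).
def determine_residue_offset (structure_sequence : String) (reference_sequence : String) : Int :=
  let structure_residue_positions : PySem.Dict Int Char :=
    (PySem.List.enumerate structure_sequence.toList).foldl
      (fun d p => d.insert p.1 p.2) PySem.Dict.empty
  let reference_residue_positions : PySem.Dict Int Char :=
    (PySem.List.enumerate reference_sequence.toList).foldl
      (fun d p => d.insert p.1 p.2) PySem.Dict.empty
  let matching_pairs : List (Int × Int) :=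
    structure_residue_positions.items.foldl
      (fun acc pa =>
        reference_residue_positions.items.foldl
          (fun acc pb => if pa.2 == pb.2 then acc ++ [(pa.1, pb.1)] else acc) acc) []
  let offsets : PySem.Dict Int Int :=
    matching_pairs.foldl (fun d p => d.modify (p.2 - p.1) 0 (· + 1)) PySem.Dict.empty
  if offsets.items ≠ [] then
    (PySem.List.max? offsets.keys (fun k => offsets.getD k 0)).getD 0
  else 0

-- ===== PORT B =====
def determine_residue_offset_alt (structure_sequence : String) (reference_sequence : String) : Int :=
  let positions_by_char : PySem.Dict Char (List Int) :=
    (PySem.List.enumerate reference_sequence.toList).foldl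
      (fun d p => d.modify p.2 [] (· ++ [p.1])) PySem.Dict.empty
  let counts : PySem.Dict Int Int :=
    (PySem.List.enumerate structure_sequence.toList).foldl
      (fun d p =>
        (positions_by_char.getD p.2 []).foldl
          (fun d j => d.modify (j - p.1) 0 (· + 1)) d) PySem.Dict.empty
  if counts.items = [] then 0
  else (PySem.List.max? counts.keys (fun k => counts.getD k 0)).getD 0

-- ===== PRECONDITION & SPEC =====
def Spec_determine_residue_offset (structure_sequence : String) (reference_sequence : String) (out : Int) : Prop := out = determine_residue_offset_alt structure_sequence reference_sequence
instance (structure_sequence : String) (reference_sequence : String) (out : Int) : Decidable (Spec_determine_residue_offset structure_sequence reference_sequence out) := by unfold Spec_determine_residue_offset; infer_instance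

-- ===== CLAIM (what is proved, stated in full; the proofs are below) =====
def Claim_equal_determine_residue_offset : Prop := ∀ (structure_sequence : String) (reference_sequence : String), Dom_determine_residue_offset structure_sequence reference_sequence → Spec_determine_residue_offset structure_sequence reference_sequence (determine_residue_offset structure_sequence reference_sequence)

-- ===== LEMMAS AND PROOFS =====

-- proof-side abbreviations for the two programs' inner structures
def pvPosIdx (rs : List Char) : PySem.Dict Char (List Int) :=
  (PySem.List.enumerate rs).foldl (fun d p => d.modify p.2 [] (· ++ [p.1])) PySem.Dict.empty

def pvPairs (ss rs : List Char) : List (Int × Int) :=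
  (PySem.List.enumerate ss).foldl
    (fun acc pa =>
      (PySem.List.enumerate rs).foldl
        (fun acc pb => if pa.2 == pb.2 then acc ++ [(pa.1, pb.1)] else acc) acc) []

-- the dict {index: aa} built from enumerate has all-fresh distinct keys, so its items are the enumerate list
lemma items_enum_dict (xs : List Char) :
    ((PySem.List.enumerate xs).foldl (fun d p => d.insert p.1 p.2)
      (PySem.Dict.empty : PySem.Dict Int Char)).items = PySem.List.enumerate xs := by
  have hnd : (List.map (fun p : Int × Char => p.1) (PySem.List.enumerate xs)).Nodup :=
    List.pairwise_map.mpr ((PySem.List.pairwise_lt_enumerate xs 0).imp fun h => ne_of_lt h)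
  have h := PySem.Dict.items_foldl_insert_fresh (PySem.List.enumerate xs)
      (fun p => p.1) (fun p => p.2) PySem.Dict.empty (fun a _ => by simp) hnd
  rw [h]
  simp [show (PySem.Dict.empty : PySem.Dict Int Char).items = [] from rfl]

-- a nested loop updating one accumulator is the same loop over the flattened list
lemma foldl_foldl_flat {α β δ : Type} (step : δ → β → δ) (g : α → List β) (l : List α) (d : δ) :
    l.foldl (fun d a => (g a).foldl step d) d = (l.flatMap g).foldl step d := by
  induction l generalizing d with
  | nil => rfl
  | cons x t ih => simp only [List.foldl_cons, List.flatMap_cons, List.foldl_append, ih]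

-- B's per-character index retrieves exactly the reference positions of that character, in order
lemma getD_pos_by_char (xs : List Char) (c : Char) :
    (pvPosIdx xs).getD c []
      = List.map (fun p : Int × Char => p.1)
          (List.filter (fun p => p.2 == c) (PySem.List.enumerate xs)) := by
  unfold pvPosIdx
  have hm : (PySem.List.enumerate xs).foldl (fun d p => d.modify p.2 [] (· ++ [p.1]))
        (PySem.Dict.empty : PySem.Dict Char (List Int))
      = (List.map Prod.swap (PySem.List.enumerate xs)).foldl
          (fun d q => d.modify q.1 [] (· ++ [q.2])) PySem.Dict.empty := by
    rw [List.foldl_map]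
    apply PySem.List.foldl_congr_mem
    intro acc x _
    simp
  rw [hm, PySem.Dict.getD_foldl_modify_append, List.filter_map]
  simp [Function.comp_def]

-- the two programs feed the SAME sequence of offsets to the same counting loop
lemma offsets_dict_eq (ss rs : List Char) :
    (pvPairs ss rs).foldl (fun d p => d.modify (p.2 - p.1) 0 (· + 1))
        (PySem.Dict.empty : PySem.Dict Int Int)
      = (PySem.List.enumerate ss).foldl
          (fun d p =>
            ((pvPosIdx rs).getD p.2 []).foldl
              (fun d j => d.modify (j - p.1) 0 (· + 1)) d)
          (PySem.Dict.empty : PySem.Dict Int Int) := by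
  have hpairs : pvPairs ss rs
      = (PySem.List.enumerate ss).flatMap
          (fun pa => List.map (fun pb : Int × Char => (pa.1, pb.1))
            (List.filter (fun pb => pa.2 == pb.2) (PySem.List.enumerate rs))) := by
    unfold pvPairs
    rw [show (fun (acc : List (Int × Int)) (pa : Int × Char) =>
          (PySem.List.enumerate rs).foldl
            (fun acc pb => if pa.2 == pb.2 then acc ++ [(pa.1, pb.1)] else acc) acc)
        = (fun acc pa => acc ++ List.map (fun pb : Int × Char => (pa.1, pb.1))
            (List.filter (fun pb => pa.2 == pb.2) (PySem.List.enumerate rs)))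
      from funext fun acc => funext fun pa =>
        PySem.List.foldl_append_if (fun pb => pa.2 == pb.2) (fun pb => (pa.1, pb.1))
          (PySem.List.enumerate rs) acc]
    rw [PySem.List.foldl_append_eq_flatMap]
    rfl
  rw [hpairs, ← foldl_foldl_flat]
  rw [show (fun (d : PySem.Dict Int Int) (pa : Int × Char) =>
        (List.map (fun pb : Int × Char => (pa.1, pb.1))
          (List.filter (fun pb => pa.2 == pb.2) (PySem.List.enumerate rs))).foldl
          (fun d p => d.modify (p.2 - p.1) 0 (· + 1)) d)
      = (fun d pa => ((pvPosIdx rs).getD pa.2 []).foldl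
          (fun d j => d.modify (j - pa.1) 0 (· + 1)) d)
    from funext fun d => funext fun pa => by
      rw [getD_pos_by_char, List.foldl_map, List.foldl_map,
        show (fun pb : Int × Char => pa.2 == pb.2) = (fun pb : Int × Char => pb.2 == pa.2)
          from funext fun pb => Bool.beq_comm]]

-- the final guarded extraction is the same on both sides once the dicts coincide
lemma finish_eq (D : PySem.Dict Int Int) :
    (if D.items ≠ [] then (PySem.List.max? D.keys (fun k => D.getD k 0)).getD 0 else 0)
      = (if D.items = [] then 0 else (PySem.List.max? D.keys (fun k => D.getD k 0)).getD 0) := by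
  by_cases h0 : D.items = [] <;> simp [h0]

-- ===== VERDICT (by name: the statement is the Claim_ definition above) =====
theorem determine_residue_offset_spec : Claim_equal_determine_residue_offset := by
  intro ss rs _
  show _ = _
  unfold determine_residue_offset determine_residue_offset_alt
  simp only [items_enum_dict]
  have h := offsets_dict_eq ss.toList rs.toList
  unfold pvPairs pvPosIdx at h
  rw [← h]
  exact finish_eq _
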